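-- pv_equiv track=rewrite | github.com/VladSilin/EPIJudge | epi_judge_python/is_string_in_matrix.py | is_pattern_contained_in_grid
-- ===== SOURCE A (Python) =====
-- from typing import List
--
-- def is_pattern_contained_in_grid(grid: List[List[int]], pattern: List[int]) -> bool:
--     previous_attempts = set()
--
--     def does_current_elem_satisfy_current_path_elem(
--         i: int, j: int, current_pattern_element_idx: int
--     ):
--         if len(pattern) == current_pattern_element_idx:
--             return True
--
--         if (
--             (0 <= i < len(grid) and 0 <= j < len(grid[i]))
--             and grid[i][j] == pattern[current_pattern_element_idx]
--             and (i, j, current_pattern_element_idx) not in previous_attempts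
--             # TODO: Add to notes (traverse in any direction from a coordinate)
--             and any(
--                 does_current_elem_satisfy_current_path_elem(
--                     i + a, j + b, current_pattern_element_idx + 1
--                 )
--                 for a, b in ((-1, 0), (1, 0), (0, -1), (0, 1))
--             )
--         ):
--             return True
--
--         # This case is where the current elem + pattern elem are not satisfactory
--         previous_attempts.add((i, j, current_pattern_element_idx))
--         return False
--
--     return any(
--         does_current_elem_satisfy_current_path_elem(x, y, 0)
--         for x in range(len(grid))
--         for y in range(len(grid[x]))
--     )
-- ===== SOURCE B (Python) =====
-- from typing import List
--
--
-- def is_pattern_contained_in_grid(grid: List[List[int]], pattern: List[int]) -> bool: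
--     # Layered forward reachability over pattern indices (BFS/DP) instead of DFS.
--     if not pattern:
--         # the DFS entry returns True as soon as any cell exists
--         return any(len(row) > 0 for row in grid)
--     frontier = {
--         (i, j)
--         for i, row in enumerate(grid)
--         for j, v in enumerate(row)
--         if v == pattern[0]
--     }
--     for want in pattern[1:]:
--         nxt = set()
--         for i, j in frontier:
--             for di, dj in ((-1, 0), (1, 0), (0, -1), (0, 1)):
--                 ni, nj = i + di, j + dj
--                 if (
--                     0 <= ni < len(grid)
--                     and 0 <= nj < len(grid[ni])
--                     and grid[ni][nj] == want
--                 ):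
--                     nxt.add((ni, nj))
--         frontier = nxt
--     return bool(frontier)
-- ===== Notes on version B (the rewrite author's own statement) =====
-- stated objective: alternative
-- what changed: Replaced the recursive DFS with a failure cache by an iterative layered reachability: one frontier set of cells per pattern index, advanced to in-bounds matching 4-neighbours; the result is whether the last frontier is non-empty (cells may repeat along a path, so layered reachability is exact). Trades A's early exit on a hit for bounded frontiers and no recursion.
import Mathlib
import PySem

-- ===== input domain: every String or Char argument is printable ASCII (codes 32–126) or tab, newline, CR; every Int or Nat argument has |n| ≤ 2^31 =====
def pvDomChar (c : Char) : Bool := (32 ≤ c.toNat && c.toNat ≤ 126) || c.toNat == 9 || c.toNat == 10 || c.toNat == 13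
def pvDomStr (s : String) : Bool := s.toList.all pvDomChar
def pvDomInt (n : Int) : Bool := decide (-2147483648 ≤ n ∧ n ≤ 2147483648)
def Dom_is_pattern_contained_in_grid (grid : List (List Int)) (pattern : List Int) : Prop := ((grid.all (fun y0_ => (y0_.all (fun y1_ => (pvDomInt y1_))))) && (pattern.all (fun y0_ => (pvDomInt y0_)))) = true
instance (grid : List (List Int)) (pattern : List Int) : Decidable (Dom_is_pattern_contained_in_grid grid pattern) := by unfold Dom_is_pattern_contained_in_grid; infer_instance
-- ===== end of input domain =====

-- B replaces A's recursive DFS-with-failure-cache by an iterative layered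
-- reachability over pattern indices (one frontier set per index); same results.

-- ===== PORT A =====

-- 0 <= i < len(grid) and 0 <= j < len(grid[i])  (grid[i] read only after the first chain holds)
def pvBounds (grid : List (List Int)) (i j : Int) : Bool :=
  (decide (0 ≤ i) && decide (i < (grid.length : Int))) &&
    (match PySem.List.pyGet? grid i with
     | some row => decide (0 ≤ j) && decide (j < (row.length : Int))
     | none => false)

-- grid[i][j] (read only under pvBounds, where both lookups succeed)
def pvCell? (grid : List (List Int)) (i j : Int) : Option Int :=
  (PySem.List.pyGet? grid i).bind fun row => PySem.List.pyGet? row j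

def pvDirs : List (Int × Int) := [(-1, 0), (1, 0), (0, -1), (0, 1)]

-- does_current_elem_satisfy_current_path_elem, with the memo set threaded through;
-- the `any(...)` over the literal 4-tuple of directions is unrolled in order with
-- Python's short-circuiting.
def pvDfs (grid : List (List Int)) (pattern : List Int) (k : Nat) (i j : Int)
    (prev : PySem.Set (Int × Int × Nat)) : Bool × PySem.Set (Int × Int × Nat) :=
  if pattern.length = k then (true, prev)
  else
    match h : pattern[k]? with
    | none => (false, PySem.Set.add prev (i, j, k))  -- unreachable from the entry point (k never exceeds len(pattern))
    | some pk =>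
      if pvBounds grid i j && (pvCell? grid i j == some pk)
          && !(PySem.Set.contains prev (i, j, k)) then
        let r1 := pvDfs grid pattern (k+1) (i-1) j prev
        if r1.1 then (true, r1.2) else
        let r2 := pvDfs grid pattern (k+1) (i+1) j r1.2
        if r2.1 then (true, r2.2) else
        let r3 := pvDfs grid pattern (k+1) i (j-1) r2.2
        if r3.1 then (true, r3.2) else
        let r4 := pvDfs grid pattern (k+1) i (j+1) r3.2
        if r4.1 then (true, r4.2)
        else (false, PySem.Set.add r4.2 (i, j, k))
      else (false, PySem.Set.add prev (i, j, k))
  termination_by pattern.length - k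
  decreasing_by
    all_goals
      have hk : k < pattern.length := (List.getElem?_eq_some_iff.mp h).1
      omega

-- the cells (x, y) for x in range(len(grid)) for y in range(len(grid[x])), in generator order
def pvCells (grid : List (List Int)) : List (Int × Int) :=
  (List.range grid.length).flatMap fun x =>
    (List.range (grid.getD x []).length).map fun y => ((x : Int), (y : Int))

-- any(...) over the nested generator, threading the shared memo set
def pvScan (grid : List (List Int)) (pattern : List Int) :
    List (Int × Int) → PySem.Set (Int × Int × Nat) → Bool
  | [], _ => false
  | p :: rest, prev =>
    let r := pvDfs grid pattern 0 p.1 p.2 prev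
    if r.1 then true else pvScan grid pattern rest r.2

def is_pattern_contained_in_grid (grid : List (List Int)) (pattern : List Int) : Bool :=
  pvScan grid pattern (pvCells grid) PySem.Set.empty

-- ===== PORT B =====

-- {(i, j) for i, row in enumerate(grid) for j, v in enumerate(row) if v == pattern[0]}
def pvSeeds (grid : List (List Int)) (p0 : Int) : PySem.Set (Int × Int) :=
  (PySem.List.enumerate grid 0).foldl
    (fun S ir =>
      (PySem.List.enumerate ir.2 0).foldl
        (fun S jv =>
          if jv.2 == p0 then PySem.Set.add S (ir.1, jv.1) else S)
        S)
    PySem.Set.empty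

-- one layer: the in-bounds 4-neighbours of the frontier whose value is `want`
def pvStep (grid : List (List Int)) (want : Int) (S : PySem.Set (Int × Int)) :
    PySem.Set (Int × Int) :=
  S.foldl
    (fun T p =>
      pvDirs.foldl
        (fun T d =>
          if pvBounds grid (p.1 + d.1) (p.2 + d.2)
              && (pvCell? grid (p.1 + d.1) (p.2 + d.2) == some want) then
            PySem.Set.add T (p.1 + d.1, p.2 + d.2)
          else T)
        T)
    PySem.Set.empty

def is_pattern_contained_in_grid_alt (grid : List (List Int)) (pattern : List Int) : Bool :=
  match pattern with
  | [] => grid.any fun row => decide (0 < (row.length : Int))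
  | p0 :: rest => !((rest.foldl (fun S want => pvStep grid want S) (pvSeeds grid p0)).isEmpty)

-- ===== PRECONDITION & SPEC =====
def Spec_is_pattern_contained_in_grid (grid : List (List Int)) (pattern : List Int) (out : Bool) : Prop := out = is_pattern_contained_in_grid_alt grid pattern
instance (grid : List (List Int)) (pattern : List Int) (out : Bool) : Decidable (Spec_is_pattern_contained_in_grid grid pattern out) := by unfold Spec_is_pattern_contained_in_grid; infer_instance

-- ===== CLAIM (what is proved, stated in full; the proofs are below) =====
def Claim_equal_is_pattern_contained_in_grid : Prop := ∀ (grid : List (List Int)) (pattern : List Int), Dom_is_pattern_contained_in_grid grid pattern → Spec_is_pattern_contained_in_grid grid pattern (is_pattern_contained_in_grid grid pattern)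

-- ===== LEMMAS AND PROOFS =====

-- the reference predicate: a walk starting at (i, j) matches pattern[k:]
def pvSat (grid : List (List Int)) (pattern : List Int) (k : Nat) (i j : Int) : Bool :=
  if h : k < pattern.length then
    pvBounds grid i j && (pvCell? grid i j == some pattern[k]) &&
      pvDirs.any fun d => pvSat grid pattern (k+1) (i + d.1) (j + d.2)
  else true
  termination_by pattern.length - k

-- every memo entry records a genuine failure
def pvInv (grid : List (List Int)) (pattern : List Int)
    (prev : PySem.Set (Int × Int × Nat)) : Prop :=
  ∀ i j k, (i, j, k) ∈ prev → pvSat grid pattern k i j = false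

lemma pvSat_of_ge (grid : List (List Int)) (pattern : List Int) (k : Nat) (i j : Int)
    (h : pattern.length ≤ k) : pvSat grid pattern k i j = true := by
  rw [pvSat]; simp [Nat.not_lt.mpr h]

lemma pvSat_of_lt (grid : List (List Int)) (pattern : List Int) (k : Nat) (i j : Int)
    (h : k < pattern.length) :
    pvSat grid pattern k i j =
      (pvBounds grid i j && (pvCell? grid i j == some pattern[k]) &&
        pvDirs.any fun d => pvSat grid pattern (k+1) (i + d.1) (j + d.2)) := by
  rw [pvSat]; simp [h]

lemma pvSat_hit (grid : List (List Int)) (pattern : List Int) (k : Nat) (i j : Int)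
    (hlt : k < pattern.length) (hb : pvBounds grid i j = true)
    (hc : pvCell? grid i j = some pattern[k]) :
    pvSat grid pattern k i j =
      (pvSat grid pattern (k+1) (i-1) j || (pvSat grid pattern (k+1) (i+1) j ||
        (pvSat grid pattern (k+1) i (j-1) || pvSat grid pattern (k+1) i (j+1)))) := by
  rw [pvSat_of_lt grid pattern k i j hlt, hb, hc]
  simp [pvDirs, sub_eq_add_neg]

lemma pvInv_add (grid : List (List Int)) (pattern : List Int)
    (prev : PySem.Set (Int × Int × Nat)) (i j : Int) (k : Nat)
    (hinv : pvInv grid pattern prev) (hf : pvSat grid pattern k i j = false) :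
    pvInv grid pattern (PySem.Set.add prev (i, j, k)) := by
  intro a b c hmem
  rcases (PySem.Set.mem_add prev (i, j, k) (a, b, c)).mp hmem with hm | he
  · exact hinv a b c hm
  · obtain ⟨rfl, rfl, rfl⟩ : a = i ∧ b = j ∧ c = k := by
      refine ⟨congrArg (fun p => p.1) he, congrArg (fun p => p.2.1) he,
        congrArg (fun p => p.2.2) he⟩
    exact hf

lemma pvDfs_correct (grid : List (List Int)) (pattern : List Int) :
    ∀ (k : Nat) (i j : Int) (prev : PySem.Set (Int × Int × Nat)),
      k ≤ pattern.length → pvInv grid pattern prev →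
      (pvDfs grid pattern k i j prev).1 = pvSat grid pattern k i j ∧
        pvInv grid pattern (pvDfs grid pattern k i j prev).2 := by
  intro k i j prev
  fun_induction pvDfs grid pattern k i j prev with
  | case1 i j prev =>
    intro hk hinv
    exact ⟨(pvSat_of_ge grid pattern _ i j le_rfl).symm, hinv⟩
  | case2 k i j prev hne h =>
    intro hk hinv
    exfalso
    have := List.getElem?_eq_none_iff.mp h
    omega
  | case3 k i j prev hne pk hpk hg r1 hr1 ih1 =>
    intro hk hinv
    obtain ⟨hlt, hpkv⟩ := List.getElem?_eq_some_iff.mp hpk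
    simp only [Bool.and_eq_true, beq_iff_eq, Bool.not_eq_eq_eq_not, Bool.not_true] at hg
    obtain ⟨⟨hb, hc⟩, _⟩ := hg
    obtain ⟨e1, v1⟩ := ih1 (by omega) hinv
    refine ⟨?_, v1⟩
    rw [pvSat_hit grid pattern k i j hlt hb (by rw [hc, hpkv]), ← e1, hr1]
    simp
  | case4 k i j prev hne pk hpk hg r1 hr1 r2 hr2 ih2 ih1 =>
    intro hk hinv
    obtain ⟨hlt, hpkv⟩ := List.getElem?_eq_some_iff.mp hpk
    simp only [Bool.and_eq_true, beq_iff_eq, Bool.not_eq_eq_eq_not, Bool.not_true] at hg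
    obtain ⟨⟨hb, hc⟩, _⟩ := hg
    obtain ⟨e1, v1⟩ := ih2 (by omega) hinv
    obtain ⟨e2, v2⟩ := ih1 (by omega) v1
    refine ⟨?_, v2⟩
    rw [pvSat_hit grid pattern k i j hlt hb (by rw [hc, hpkv]), ← e1, ← e2, hr2]
    simp
  | case5 k i j prev hne pk hpk hg r1 hr1 r2 hr2 r3 hr3 a1 a2 a3 a4 =>
    intro hk hinv
    obtain ⟨hlt, hpkv⟩ := List.getElem?_eq_some_iff.mp hpk
    simp only [Bool.and_eq_true, beq_iff_eq, Bool.not_eq_eq_eq_not, Bool.not_true] at hg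
    obtain ⟨⟨hb, hc⟩, _⟩ := hg
    obtain ⟨e1, v1⟩ := a1 (by omega) hinv
    obtain ⟨e2, v2⟩ := a2 (by omega) v1
    obtain ⟨e3, v3⟩ := a4 (by omega) v2
    refine ⟨?_, v3⟩
    rw [pvSat_hit grid pattern k i j hlt hb (by rw [hc, hpkv]), ← e1, ← e2, ← e3, hr3]
    simp
  | case6 k i j prev hne pk hpk hg r1 hr1 r2 hr2 r3 hr3 r4 hr4 a1 a2 a3 a4 a5 a6 =>
    intro hk hinv
    obtain ⟨hlt, hpkv⟩ := List.getElem?_eq_some_iff.mp hpk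
    simp only [Bool.and_eq_true, beq_iff_eq, Bool.not_eq_eq_eq_not, Bool.not_true] at hg
    obtain ⟨⟨hb, hc⟩, _⟩ := hg
    obtain ⟨e1, v1⟩ := a1 (by omega) hinv
    obtain ⟨e2, v2⟩ := a2 (by omega) v1
    obtain ⟨e3, v3⟩ := a4 (by omega) v2
    obtain ⟨e4, v4⟩ := a6 (by omega) v3
    refine ⟨?_, v4⟩
    rw [pvSat_hit grid pattern k i j hlt hb (by rw [hc, hpkv]), ← e1, ← e2, ← e3, ← e4, hr4]
    simp
  | case7 k i j prev hne pk hpk hg r1 hr1 r2 hr2 r3 hr3 r4 hr4 a1 a2 a3 a4 a5 a6 =>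
    intro hk hinv
    obtain ⟨hlt, hpkv⟩ := List.getElem?_eq_some_iff.mp hpk
    simp only [Bool.and_eq_true, beq_iff_eq, Bool.not_eq_eq_eq_not, Bool.not_true] at hg
    obtain ⟨⟨hb, hc⟩, _⟩ := hg
    obtain ⟨e1, v1⟩ := a1 (by omega) hinv
    obtain ⟨e2, v2⟩ := a2 (by omega) v1
    obtain ⟨e3, v3⟩ := a4 (by omega) v2
    obtain ⟨e4, v4⟩ := a6 (by omega) v3
    have hf : pvSat grid pattern k i j = false := by
      rw [pvSat_hit grid pattern k i j hlt hb (by rw [hc, hpkv]), ← e1, ← e2, ← e3, ← e4]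
      simp only [Bool.or_eq_false_iff]
      exact ⟨Bool.eq_false_iff.mpr hr1, Bool.eq_false_iff.mpr hr2, Bool.eq_false_iff.mpr hr3,
        Bool.eq_false_iff.mpr hr4⟩
    exact ⟨hf.symm, pvInv_add grid pattern _ i j k v4 hf⟩
  | case8 k i j prev hne pk hpk hg =>
    intro hk hinv
    obtain ⟨hlt, hpkv⟩ := List.getElem?_eq_some_iff.mp hpk
    have hf : pvSat grid pattern k i j = false := by
      by_cases hbc : (pvBounds grid i j && (pvCell? grid i j == some pk)) = true
      · by_cases hcont : PySem.Set.contains prev (i, j, k) = true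
        · exact hinv i j k ((PySem.Set.contains_iff prev (i, j, k)).mp hcont)
        · exfalso
          apply hg
          rw [hbc, Bool.eq_false_iff.mpr hcont]
          rfl
      · rw [pvSat_of_lt grid pattern k i j hlt]
        rw [← hpkv] at hbc
        refine Bool.eq_false_iff.mpr fun h => hbc ?_
        rw [Bool.and_eq_true] at h
        exact h.1
    exact ⟨hf.symm, pvInv_add grid pattern prev i j k hinv hf⟩
lemma pvScan_eq_any (grid : List (List Int)) (pattern : List Int) :
    ∀ (cells : List (Int × Int)) (prev : PySem.Set (Int × Int × Nat)),
      pvInv grid pattern prev →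
      pvScan grid pattern cells prev
        = cells.any (fun p => pvSat grid pattern 0 p.1 p.2) := by
  intro cells
  induction cells with
  | nil => intro prev _; rfl
  | cons p rest ih =>
    intro prev hinv
    obtain ⟨e, v⟩ := pvDfs_correct grid pattern 0 p.1 p.2 prev (Nat.zero_le _) hinv
    simp only [pvScan, List.any_cons]
    cases h : (pvDfs grid pattern 0 p.1 p.2 prev).1 with
    | true => rw [h] at e; simp [← e]
    | false => rw [h] at e; simp [← e, ih _ v]

-- membership in conditional-add folds (the loop shapes of pvSeeds and pvStep)

lemma pv_mem_foldl1 {α γ : Type} [BEq α] [LawfulBEq α] (c : γ → Bool) (f : γ → α) :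
    ∀ (l : List γ) (T : List α) (x : α),
      x ∈ l.foldl (fun S e => if c e then PySem.Set.add S (f e) else S) T ↔
        x ∈ T ∨ ∃ e ∈ l, c e = true ∧ x = f e := by
  intro l
  induction l with
  | nil => simp
  | cons e l ih =>
    intro T x
    simp only [List.foldl_cons, ih]
    by_cases h : c e = true
    · simp only [if_pos h, PySem.Set.mem_add, List.mem_cons]
      constructor
      · rintro ((hx | rfl) | he)
        · exact Or.inl hx
        · exact Or.inr ⟨e, Or.inl rfl, h, rfl⟩
        · obtain ⟨e', he', hc, rfl⟩ := he; exact Or.inr ⟨e', Or.inr he', hc, rfl⟩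
      · rintro (hx | ⟨e', (rfl | he'), hc, rfl⟩)
        · exact Or.inl (Or.inl hx)
        · exact Or.inl (Or.inr rfl)
        · exact Or.inr ⟨e', he', hc, rfl⟩
    · simp only [if_neg h, List.mem_cons]
      constructor
      · rintro (hx | ⟨e', he', hc, rfl⟩)
        · exact Or.inl hx
        · exact Or.inr ⟨e', Or.inr he', hc, rfl⟩
      · rintro (hx | ⟨e', (rfl | he'), hc, rfl⟩)
        · exact Or.inl hx
        · exact (h hc).elim
        · exact Or.inr ⟨e', he', hc, rfl⟩

lemma pv_mem_foldl2 {α β γ : Type} [BEq α] [LawfulBEq α] (g : β → List γ)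
    (c : β → γ → Bool) (f : β → γ → α) :
    ∀ (l : List β) (T : List α) (x : α),
      x ∈ l.foldl (fun S b => (g b).foldl (fun S e => if c b e then PySem.Set.add S (f b e) else S) S) T ↔
        x ∈ T ∨ ∃ b ∈ l, ∃ e ∈ g b, c b e = true ∧ x = f b e := by
  intro l
  induction l with
  | nil => simp
  | cons b l ih =>
    intro T x
    simp only [List.foldl_cons, ih, pv_mem_foldl1, List.mem_cons]
    constructor
    · rintro ((hx | ⟨e, he, hc, rfl⟩) | ⟨b', hb', e, he, hc, rfl⟩)
      · exact Or.inl hx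
      · exact Or.inr ⟨b, Or.inl rfl, e, he, hc, rfl⟩
      · exact Or.inr ⟨b', Or.inr hb', e, he, hc, rfl⟩
    · rintro (hx | ⟨b', (rfl | hb'), e, he, hc, rfl⟩)
      · exact Or.inl (Or.inl hx)
      · exact Or.inl (Or.inr ⟨e, he, hc, rfl⟩)
      · exact Or.inr ⟨b', hb', e, he, hc, rfl⟩

lemma pvStep_mem (grid : List (List Int)) (want : Int) (S : PySem.Set (Int × Int))
    (x : Int × Int) :
    x ∈ pvStep grid want S ↔
      ∃ p ∈ S, ∃ d ∈ pvDirs,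
        (pvBounds grid (p.1 + d.1) (p.2 + d.2)
          && (pvCell? grid (p.1 + d.1) (p.2 + d.2) == some want)) = true ∧
        x = (p.1 + d.1, p.2 + d.2) := by
  simpa [pvStep] using pv_mem_foldl2 (fun _ => pvDirs)
    (fun p d => pvBounds grid (p.1 + d.1) (p.2 + d.2)
      && (pvCell? grid (p.1 + d.1) (p.2 + d.2) == some want))
    (fun p d => (p.1 + d.1, p.2 + d.2)) S PySem.Set.empty x

-- pvBounds together with the cell value, at Nat coordinates
lemma pvBC_cast (grid : List (List Int)) (a b : Nat) (v : Int) :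
    (pvBounds grid (a : Int) (b : Int) && (pvCell? grid (a : Int) (b : Int) == some v)) = true ↔
      ∃ h : a < grid.length, ∃ h2 : b < grid[a].length, grid[a][b] = v := by
  by_cases ha : a < grid.length
  · rw [pvBounds, pvCell?]
    simp only [PySem.List.pyGet?_natCast, List.getElem?_eq_getElem ha, ha]
    simp [List.getElem?_eq_some_iff]
    exact fun h _ => ⟨ha, h⟩
  · rw [pvBounds]
    simp [PySem.List.pyGet?_natCast, ha]

lemma pvBounds_nonneg (grid : List (List Int)) (i j : Int)
    (h : pvBounds grid i j = true) : 0 ≤ i ∧ 0 ≤ j := by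
  rw [pvBounds] at h
  rcases hg : PySem.List.pyGet? grid i with _ | row <;> rw [hg] at h <;> simp at h
  omega

lemma pvSeeds_mem (grid : List (List Int)) (p0 : Int) (x : Int × Int) :
    x ∈ pvSeeds grid p0 ↔
      (pvBounds grid x.1 x.2 && (pvCell? grid x.1 x.2 == some p0)) = true := by
  rw [pvSeeds, pv_mem_foldl2]
  simp only [PySem.Set.empty, List.not_mem_nil, false_or]
  obtain ⟨i, j⟩ := x
  constructor
  · rintro ⟨ir, hir, jv, hjv, hc, hx⟩
    obtain ⟨rfl, rfl⟩ : i = ir.1 ∧ j = jv.1 :=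
      ⟨congrArg Prod.fst hx, congrArg Prod.snd hx⟩
    rw [PySem.List.mem_enumerate_iff] at hir
    obtain ⟨a, ha, rfl⟩ := hir
    rw [PySem.List.mem_enumerate_iff] at hjv
    obtain ⟨b, hb, rfl⟩ := hjv
    simp only [beq_iff_eq] at hc
    simpa using (pvBC_cast grid a b p0).mpr ⟨ha, by simpa using hb, by simpa using hc⟩
  · intro h
    obtain ⟨h0i, h0j⟩ := pvBounds_nonneg grid i j (Bool.and_elim_left h)
    lift i to ℕ using h0i with a
    lift j to ℕ using h0j with b
    obtain ⟨ha, hb, hv⟩ := (pvBC_cast grid a b p0).mp h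
    refine ⟨((0 : Int) + (a : Int), grid[a]), ?_, ((0 : Int) + (b : Int), grid[a][b]), ?_, ?_, by simp⟩
    · rw [PySem.List.mem_enumerate_iff]; exact ⟨a, ha, rfl⟩
    · rw [PySem.List.mem_enumerate_iff]; exact ⟨b, hb, rfl⟩
    · simpa using hv

lemma pvBounds_cast (grid : List (List Int)) (a b : Nat) :
    pvBounds grid (a : Int) (b : Int) = true ↔ ∃ h : a < grid.length, b < grid[a].length := by
  by_cases ha : a < grid.length
  · rw [pvBounds]
    simp only [PySem.List.pyGet?_natCast, List.getElem?_eq_getElem ha]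
    simp [ha]
  · rw [pvBounds]
    simp [PySem.List.pyGet?_natCast, ha]

lemma pvCells_mem (grid : List (List Int)) (i j : Int) :
    (i, j) ∈ pvCells grid ↔ pvBounds grid i j = true := by
  constructor
  · intro h
    simp [pvCells] at h
    obtain ⟨a, ha, ⟨b, hb, rfl⟩, rfl⟩ := h
    rw [pvBounds_cast]
    refine ⟨ha, ?_⟩
    simpa [List.getElem?_eq_getElem ha] using hb
  · intro hb
    obtain ⟨h0i, h0j⟩ := pvBounds_nonneg grid i j hb
    lift i to ℕ using h0i with a
    lift j to ℕ using h0j with b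
    obtain ⟨ha, hb'⟩ := (pvBounds_cast grid a b).mp hb
    simp [pvCells]
    exact ⟨ha, by simpa [List.getElem?_eq_getElem ha] using hb'⟩

-- the continuation test shared by the layer argument
def pvCont (grid : List (List Int)) (pattern : List Int) (k : Nat) (p : Int × Int) : Bool :=
  pvDirs.any fun d => pvSat grid pattern k (p.1 + d.1) (p.2 + d.2)

lemma pv_fold_layers (grid : List (List Int)) (pattern : List Int) :
    ∀ (ps : List Int) (k : Nat) (S : PySem.Set (Int × Int)),
      pattern.drop k = ps →
      ((ps.foldl (fun S want => pvStep grid want S) S) ≠ [] ↔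
        ∃ p ∈ S, pvCont grid pattern k p = true) := by
  intro ps
  induction ps with
  | nil =>
    intro k S h
    have hk : pattern.length ≤ k := by
      have := congrArg List.length h
      simp at this
      omega
    simp only [List.foldl_nil]
    have hcont : ∀ p : Int × Int, pvCont grid pattern k p = true := by
      intro p
      simp [pvCont, pvDirs, pvSat_of_ge grid pattern k _ _ hk]
    constructor
    · intro hne
      obtain ⟨p, hp⟩ := List.exists_mem_of_ne_nil S hne
      exact ⟨p, hp, hcont p⟩
    · rintro ⟨p, hp, -⟩ hnil
      rw [hnil] at hp
      exact List.not_mem_nil hp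
  | cons want ps' ih =>
    intro k S h
    have hk : k < pattern.length := by
      have := congrArg List.length h
      simp at this
      omega
    have h1 : pattern[k] = want := by
      have h0 : pattern[k]? = some want := by
        have := congrArg (fun l => l[0]?) h
        simpa [List.getElem?_drop] using this
      simpa [List.getElem?_eq_getElem hk] using h0
    have h2 : pattern.drop (k+1) = ps' := by
      have := congrArg (List.drop 1) h
      simpa [List.drop_drop, Nat.add_comm] using this
    simp only [List.foldl_cons]
    rw [ih (k+1) (pvStep grid want S) h2]
    constructor
    · rintro ⟨q, hq, hcq⟩
      obtain ⟨p, hp, d, hd, hbc, rfl⟩ := (pvStep_mem grid want S q).mp hq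
      refine ⟨p, hp, ?_⟩
      rw [pvCont, List.any_eq_true]
      refine ⟨d, hd, ?_⟩
      rw [pvSat_of_lt grid pattern k _ _ hk, h1, hbc]
      rw [pvCont] at hcq
      simp only [Bool.true_and]
      exact hcq
    · rintro ⟨p, hp, hcp⟩
      rw [pvCont, List.any_eq_true] at hcp
      obtain ⟨d, hd, hsat⟩ := hcp
      rw [pvSat_of_lt grid pattern k _ _ hk, h1] at hsat
      rw [Bool.and_eq_true, Bool.and_eq_true] at hsat
      obtain ⟨⟨hb, hc⟩, hany⟩ := hsat
      refine ⟨(p.1 + d.1, p.2 + d.2), ?_, ?_⟩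
      · exact (pvStep_mem grid want S _).mpr
          ⟨p, hp, d, hd, by rw [Bool.and_eq_true]; exact ⟨hb, hc⟩, rfl⟩
      · rw [pvCont]
        exact hany
  theorem pv_main (grid : List (List Int)) (pattern : List Int) :
    is_pattern_contained_in_grid grid pattern = is_pattern_contained_in_grid_alt grid pattern := by
  rw [is_pattern_contained_in_grid,
    pvScan_eq_any grid pattern (pvCells grid) PySem.Set.empty
      (fun a b c h => by simp [PySem.Set.empty] at h)]
  cases pattern with
  | nil =>
    rw [is_pattern_contained_in_grid_alt, Bool.eq_iff_iff]
    simp only [List.any_eq_true, decide_eq_true_eq]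
    constructor
    · rintro ⟨⟨i, j⟩, hmem, -⟩
      have hb := (pvCells_mem grid i j).mp hmem
      obtain ⟨h0i, h0j⟩ := pvBounds_nonneg grid i j hb
      lift i to ℕ using h0i with a
      lift j to ℕ using h0j with b
      obtain ⟨ha, hblt⟩ := (pvBounds_cast grid a b).mp hb
      refine ⟨grid[a], List.getElem_mem ha, ?_⟩
      exact_mod_cast (by omega : 0 < grid[a].length)
    · rintro ⟨row, hrow, hlen⟩
      obtain ⟨a, ha, rfl⟩ := List.mem_iff_getElem.mp hrow
      refine ⟨((a : Int), (0 : Int)), ?_, pvSat_of_ge grid [] 0 _ _ (by simp)⟩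
      rw [pvCells_mem]
      exact_mod_cast (pvBounds_cast grid a 0).mpr ⟨ha, by exact_mod_cast hlen⟩
  | cons p0 rest =>
    have hlayer := pv_fold_layers grid (p0 :: rest) rest 1 (pvSeeds grid p0) (by simp)
    have hB : (!(rest.foldl (fun S want => pvStep grid want S) (pvSeeds grid p0)).isEmpty) = true ↔
        rest.foldl (fun S want => pvStep grid want S) (pvSeeds grid p0) ≠ [] := by
      simp
    rw [is_pattern_contained_in_grid_alt, Bool.eq_iff_iff, hB, hlayer]
    simp only [List.any_eq_true]
    have hlt : 0 < (p0 :: rest).length := by simp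
    constructor
    · rintro ⟨⟨i, j⟩, hmem, hsat⟩
      rw [pvSat_of_lt grid (p0 :: rest) 0 i j hlt] at hsat
      rw [Bool.and_eq_true, Bool.and_eq_true] at hsat
      obtain ⟨⟨hb, hc⟩, hany⟩ := hsat
      refine ⟨(i, j), (pvSeeds_mem grid p0 (i, j)).mpr ?_, hany⟩
      rw [Bool.and_eq_true]
      exact ⟨hb, by simpa using hc⟩
    · rintro ⟨⟨i, j⟩, hp, hcont⟩
      have hbc := (pvSeeds_mem grid p0 (i, j)).mp hp
      rw [Bool.and_eq_true] at hbc
      refine ⟨(i, j), (pvCells_mem grid i j).mpr hbc.1, ?_⟩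
      rw [pvSat_of_lt grid (p0 :: rest) 0 i j hlt]
      rw [Bool.and_eq_true, Bool.and_eq_true]
      exact ⟨⟨hbc.1, by simpa using hbc.2⟩, hcont⟩

-- ===== VERDICT (by name: the statement is the Claim_ definition above) =====
theorem is_pattern_contained_in_grid_spec : Claim_equal_is_pattern_contained_in_grid := by
  intro grid pattern _
  exact pv_main grid pattern
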